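-- pv_equiv track=rewrite | github.com/aorursy/new-nb-6 | samiamami_one-match-at-a-time.py | filter_small_teams
-- ===== SOURCE A (Python) =====
-- def filter_small_teams(list_of_matches):
--     df_small_matches_1=[]
--     small_matches_2=[]
--     rest=[]
--     for i in list_of_matches:
--         if len(i)<2:
--             df_small_matches_1.append(i)
--         elif len(i)>=2 and len(i)<3:
--             small_matches_2.append(i)
--         else:
--             rest.append(i)
--     return df_small_matches_1, small_matches_2, rest
-- ===== SOURCE B (Python) =====
-- def filter_small_teams(list_of_matches):
--     return (
--         [i for i in list_of_matches if len(i) < 2],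
--         [i for i in list_of_matches if len(i) == 2],
--         [i for i in list_of_matches if len(i) >= 3],
--     )
-- ===== Notes on version B (the rewrite author's own statement) =====
-- stated objective: idiomatic
-- what changed: Replaces the single accumulating loop with three appends into mutable buckets by three independent filtering comprehensions, one full scan per bucket.
import Mathlib
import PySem

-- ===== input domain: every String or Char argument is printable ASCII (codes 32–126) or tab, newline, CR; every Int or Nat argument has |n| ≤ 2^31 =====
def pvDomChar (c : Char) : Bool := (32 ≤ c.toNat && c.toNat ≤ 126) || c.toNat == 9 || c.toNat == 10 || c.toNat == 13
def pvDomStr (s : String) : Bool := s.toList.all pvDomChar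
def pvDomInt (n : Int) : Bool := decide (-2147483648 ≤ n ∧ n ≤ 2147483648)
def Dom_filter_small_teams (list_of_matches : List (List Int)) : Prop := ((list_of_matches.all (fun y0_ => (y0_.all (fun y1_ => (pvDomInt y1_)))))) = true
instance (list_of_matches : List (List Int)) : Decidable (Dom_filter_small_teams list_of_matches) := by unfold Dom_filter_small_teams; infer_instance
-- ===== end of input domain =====

-- B replaces A's single accumulating loop with three independent filter passes (idiomatic; same cost).
-- ===== PORT A =====
-- One pass, three accumulators, appended in branch order, as in A.
def filter_small_teams (list_of_matches : List (List Int)) : List (List Int) × List (List Int) × List (List Int) :=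
  let s := list_of_matches.foldl (fun (acc : List (List Int) × List (List Int) × List (List Int)) i =>
    if i.length < 2 then (acc.1 ++ [i], acc.2.1, acc.2.2)
    else if i.length ≥ 2 ∧ i.length < 3 then (acc.1, acc.2.1 ++ [i], acc.2.2)
    else (acc.1, acc.2.1, acc.2.2 ++ [i])) ([], [], [])
  s

-- ===== PORT B =====
-- Three independent filter passes, one predicate each.
def filter_small_teams_alt (list_of_matches : List (List Int)) : List (List Int) × List (List Int) × List (List Int) :=
  (list_of_matches.filter (fun i => i.length < 2),
   list_of_matches.filter (fun i => i.length == 2),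
   list_of_matches.filter (fun i => i.length ≥ 3))

-- ===== PRECONDITION & SPEC =====
def Spec_filter_small_teams (list_of_matches : List (List Int)) (out : List (List Int) × List (List Int) × List (List Int)) : Prop := out = filter_small_teams_alt list_of_matches
instance (list_of_matches : List (List Int)) (out : List (List Int) × List (List Int) × List (List Int)) : Decidable (Spec_filter_small_teams list_of_matches out) := by unfold Spec_filter_small_teams; infer_instance

-- ===== CLAIM (what is proved, stated in full; the proofs are below) =====
def Claim_equal_filter_small_teams : Prop := ∀ (list_of_matches : List (List Int)), Dom_filter_small_teams list_of_matches → Spec_filter_small_teams list_of_matches (filter_small_teams list_of_matches)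

-- ===== LEMMAS AND PROOFS =====

-- ===== VERDICT (by name: the statement is the Claim_ definition above) =====
lemma fold_eq (l : List (List Int)) (a b c : List (List Int)) :
    l.foldl (fun (acc : List (List Int) × List (List Int) × List (List Int)) i =>
      if i.length < 2 then (acc.1 ++ [i], acc.2.1, acc.2.2)
      else if i.length ≥ 2 ∧ i.length < 3 then (acc.1, acc.2.1 ++ [i], acc.2.2)
      else (acc.1, acc.2.1, acc.2.2 ++ [i])) (a, b, c)
    = (a ++ l.filter (fun i => i.length < 2),
       b ++ l.filter (fun i => i.length == 2),
       c ++ l.filter (fun i => i.length ≥ 3)) := by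
  induction l generalizing a b c with
  | nil => simp
  | cons x xs ih =>
    simp only [List.foldl, List.filter]
    by_cases h1 : x.length < 2
    · have e : (x.length == 2) = false := by simp; omega
      rw [if_pos h1, ih]
      simp [h1, e, show ¬ x.length ≥ 3 by omega]
    · by_cases h2 : x.length < 3
      · rw [if_neg h1, if_pos (⟨by omega, h2⟩ : x.length ≥ 2 ∧ x.length < 3), ih]
        have e : (x.length == 2) = true := by simp; omega
        simp [h1, e, show ¬ x.length ≥ 3 by omega]
      · rw [if_neg h1, if_neg (by omega : ¬(x.length ≥ 2 ∧ x.length < 3)), ih]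
        have e : (x.length == 2) = false := by simp; omega
        simp [h1, e, show x.length ≥ 3 by omega]

theorem filter_small_teams_spec : Claim_equal_filter_small_teams := by
  intro l _
  unfold Spec_filter_small_teams filter_small_teams filter_small_teams_alt
  rw [fold_eq]
  simp
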